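-- pv_equiv track=rewrite | github.com/Darwinky25/DARWIN-with-ALLA-engine | visual_semantic_translator.py | _is_vertical_line
-- ===== SOURCE A (Python) =====
-- from typing import Dict, List, Tuple, Any, Optional
--
-- def _is_vertical_line(positions: List[Tuple[int, int]]) -> bool:
--     """Check if positions form a vertical line"""
--     if len(positions) < 2:
--         return False
--
--     rows = [pos[0] for pos in positions]
--     cols = [pos[1] for pos in positions]
--
--     # All same column, consecutive rows
--     if len(set(cols)) == 1:
--         rows_sorted = sorted(rows)
--         return all(rows_sorted[i+1] - rows_sorted[i] == 1 for i in range(len(rows_sorted)-1))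
--
--     return False
-- ===== SOURCE B (Python) =====
-- def _is_vertical_line(positions):
--     """Check if positions form a vertical line"""
--     if len(positions) < 2:
--         return False
--     rows = [r for r, _ in positions]
--     cols = [c for _, c in positions]
--     if len(set(cols)) != 1:
--         return False
--     # consecutive rows <=> all distinct and span exactly len-1 (no sort needed)
--     return len(set(rows)) == len(rows) and max(rows) - min(rows) == len(rows) - 1
-- ===== Notes on version B (the rewrite author's own statement) =====
-- stated objective: alternative
-- what changed: Replaces sort-then-scan of adjacent row differences with an arithmetic span test: rows are consecutive iff they are all distinct and max(rows)-min(rows)=len(rows)-1; the sort disappears (O(n) instead of O(n log n) on the same-column branch, not measurable on generated inputs).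
import Mathlib
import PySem

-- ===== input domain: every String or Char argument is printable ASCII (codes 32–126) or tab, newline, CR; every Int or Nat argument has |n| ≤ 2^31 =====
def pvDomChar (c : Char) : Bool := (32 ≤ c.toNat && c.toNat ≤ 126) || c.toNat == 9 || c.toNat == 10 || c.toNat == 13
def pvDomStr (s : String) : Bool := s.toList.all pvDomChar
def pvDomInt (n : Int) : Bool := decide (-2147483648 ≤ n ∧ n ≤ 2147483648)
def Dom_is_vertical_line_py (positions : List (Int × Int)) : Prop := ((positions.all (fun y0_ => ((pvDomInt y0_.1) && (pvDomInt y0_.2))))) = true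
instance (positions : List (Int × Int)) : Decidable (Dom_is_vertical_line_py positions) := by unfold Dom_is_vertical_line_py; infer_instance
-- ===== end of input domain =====

-- B replaces A's sort + adjacent-difference scan by a span test (distinct rows and
-- max-min = len-1), removing the sort; objective: alternative (return values proved equal).

-- ===== PORT A =====
-- the generator 'all(rows_sorted[i+1] - rows_sorted[i] == 1 for i in range(len-1))'
-- checked over adjacent pairs of the sorted list
def pvChainOnes : List Int → Bool
  | a :: b :: t => (b - a == 1) && pvChainOnes (b :: t)
  | _ => true

def is_vertical_line_py (positions : List (Int × Int)) : Bool :=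
  if positions.length < 2 then false
  else
    let rows := positions.map (·.1)
    let cols := positions.map (·.2)
    if PySem.Set.len (PySem.Set.ofList cols) == 1 then
      pvChainOnes (PySem.List.sorted rows (fun x => x) false)
    else false

-- ===== PORT B =====
def is_vertical_line_py_alt (positions : List (Int × Int)) : Bool :=
  if positions.length < 2 then false
  else
    let rows := positions.map (·.1)
    let cols := positions.map (·.2)
    if PySem.Set.len (PySem.Set.ofList cols) != 1 then false
    else
      (PySem.Set.len (PySem.Set.ofList rows) == (rows.length : Int)) &&
        match PySem.List.max? rows (fun x => x), PySem.List.min? rows (fun x => x) with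
        | some mx, some mn => mx - mn == (rows.length : Int) - 1
        | _, _ => false

-- ===== PRECONDITION & SPEC =====
def Spec_is_vertical_line_py (positions : List (Int × Int)) (out : Bool) : Prop := out = is_vertical_line_py_alt positions
instance (positions : List (Int × Int)) (out : Bool) : Decidable (Spec_is_vertical_line_py positions out) := by unfold Spec_is_vertical_line_py; infer_instance

-- ===== CLAIM (what is proved, stated in full; the proofs are below) =====
def Claim_equal_is_vertical_line_py : Prop := ∀ (positions : List (Int × Int)), Dom_is_vertical_line_py positions → Spec_is_vertical_line_py positions (is_vertical_line_py positions)

-- ===== LEMMAS AND PROOFS =====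

-- last element of a :: t
def pvLast : Int → List Int → Int
  | a, [] => a
  | _, b :: t => pvLast b t

theorem pvLast_mem (a : Int) (t : List Int) : pvLast a t ∈ a :: t := by
  induction t generalizing a with
  | nil => simp [pvLast]
  | cons b t ih =>
      simp only [pvLast]
      exact List.mem_cons_of_mem a (ih b)

theorem pvChain_pairwise_lt (a : Int) (t : List Int)
    (h : pvChainOnes (a :: t) = true) : (a :: t).Pairwise (· < ·) := by
  induction t generalizing a with
  | nil => simp
  | cons b t ih =>
      simp only [pvChainOnes, Bool.and_eq_true, beq_iff_eq] at h
      obtain ⟨h1, h2⟩ := h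
      have hp := ih b h2
      refine List.Pairwise.cons ?_ hp
      intro y hy
      rcases List.mem_cons.mp hy with rfl | hy
      · omega
      · have := (List.pairwise_cons.mp hp).1 y hy
        omega

theorem pvChain_last (a : Int) (t : List Int)
    (hlt : (a :: t).Pairwise (· < ·)) :
    a + t.length ≤ pvLast a t ∧ (pvChainOnes (a :: t) = true ↔ pvLast a t = a + t.length) := by
  induction t generalizing a with
  | nil => simp [pvLast, pvChainOnes]
  | cons b t ih =>
      have hab : a < b := (List.pairwise_cons.mp hlt).1 b (by simp)
      have hp : (b :: t).Pairwise (· < ·) := (List.pairwise_cons.mp hlt).2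
      obtain ⟨hle, hiff⟩ := ih b hp
      simp only [pvLast, pvChainOnes, Bool.and_eq_true, beq_iff_eq, List.length_cons]
      constructor
      · push_cast; omega
      · constructor
        · rintro ⟨h1, h2⟩
          have := hiff.mp h2
          push_cast; omega
        · intro h
          have hba : b = a + 1 := by push_cast at h; omega
          refine ⟨by omega, hiff.mpr ?_⟩
          push_cast at h; omega

theorem pvLast_isMax (a : Int) (t : List Int)
    (hle : (a :: t).Pairwise (· ≤ ·)) : ∀ y ∈ a :: t, y ≤ pvLast a t := by
  induction t generalizing a with
  | nil => simp [pvLast]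
  | cons b t ih =>
      intro y hy
      have hab : a ≤ b := (List.pairwise_cons.mp hle).1 b (by simp)
      have hp : (b :: t).Pairwise (· ≤ ·) := (List.pairwise_cons.mp hle).2
      rcases List.mem_cons.mp hy with rfl | hy
      · simp only [pvLast]
        have := ih b hp b (by simp)
        omega
      · exact ih b hp y hy

theorem pvNodup_of_len (xs : List Int) (h : (PySem.Set.ofList xs).length = xs.length) : xs.Nodup := by
  have h1 : (PySem.Set.ofList xs).Nodup := PySem.Set.nodup_ofList xs
  have h2 : (PySem.Set.ofList xs).toFinset = xs.toFinset := by
    ext x; simp [PySem.Set.mem_ofList]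
  have h3 : (PySem.Set.ofList xs).toFinset.card = (PySem.Set.ofList xs).length :=
    List.toFinset_card_of_nodup h1
  have h4 : xs.dedup.length = xs.length := by
    rw [← List.card_toFinset xs, ← h2, h3, h]
  exact List.dedup_eq_self.mp (List.Sublist.eq_of_length (List.dedup_sublist xs) h4)

theorem pvMain (rows : List Int) (hr : 2 ≤ rows.length) :
    pvChainOnes (PySem.List.sorted rows (fun x => x) false) =
      ((PySem.Set.len (PySem.Set.ofList rows) == (rows.length : Int)) &&
        match PySem.List.max? rows (fun x => x), PySem.List.min? rows (fun x => x) with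
        | some mx, some mn => mx - mn == (rows.length : Int) - 1
        | _, _ => false) := by
  have hrne : rows ≠ [] := by intro h; rw [h] at hr; simp at hr
  obtain ⟨mx, hmx⟩ : ∃ mx, PySem.List.max? rows (fun x => x) = some mx := by
    cases h : PySem.List.max? rows (fun x => x) with
    | none => exact absurd ((PySem.List.max?_eq_none_iff _ _).mp h) hrne
    | some mx => exact ⟨mx, rfl⟩
  obtain ⟨mn, hmn⟩ : ∃ mn, PySem.List.min? rows (fun x => x) = some mn := by
    cases h : PySem.List.min? rows (fun x => x) with
    | none => exact absurd ((PySem.List.min?_eq_none_iff _ _).mp h) hrne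
    | some mn => exact ⟨mn, rfl⟩
  cases hs : PySem.List.sorted rows (fun x => x) false with
  | nil => exact absurd ((PySem.List.sorted_eq_nil_iff _ _ _).mp hs) hrne
  | cons a t =>
    have hperm : (a :: t).Perm rows := hs ▸ PySem.List.sorted_perm rows (fun x => x) false
    have hpw : (a :: t).Pairwise (· ≤ ·) := by
      have := PySem.List.sorted_pairwise rows (fun x => x)
      rw [hs] at this; exact this
    have hL : rows.length = t.length + 1 := by
      have := hperm.length_eq; simpa using this.symm
    have hmnmem : mn ∈ rows := PySem.List.min?_mem hmn
    have hmxmem : mx ∈ rows := PySem.List.max?_mem hmx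
    have hmnmin : ∀ y ∈ rows, mn ≤ y := fun y hy => PySem.List.min?_isMin hmn y hy
    have hmxmax : ∀ y ∈ rows, y ≤ mx := fun y hy => PySem.List.max?_isMax hmx y hy
    have hamem : a ∈ rows := hperm.subset (List.mem_cons_self)
    have hamn : a = mn := by
      have h1 := PySem.List.key_head_sorted_le _ _ hs mn hmnmem
      have h2 := hmnmin a hamem
      omega
    have hlmx : pvLast a t = mx := by
      have h1 : pvLast a t ∈ rows := hperm.subset (pvLast_mem a t)
      have h2 := hmxmax _ h1
      have h3 : mx ∈ a :: t := (hperm.mem_iff).mpr hmxmem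
      have h4 := pvLast_isMax a t hpw mx h3
      omega
    rw [hmx, hmn, Bool.eq_iff_iff]
    simp only [Bool.and_eq_true, beq_iff_eq]
    constructor
    · intro hch
      have hplt := pvChain_pairwise_lt a t hch
      have hlast := (pvChain_last a t hplt).2.mp hch
      have hpne : (a :: t).Pairwise (· ≠ ·) := hplt.imp fun h => ne_of_lt h
      have hnd : rows.Nodup := (hperm.nodup_iff).mp hpne
      refine ⟨?_, by omega⟩
      rw [PySem.Set.ofList_eq_self_of_nodup rows hnd]
      simp [PySem.Set.len]
    · rintro ⟨hnl, hspan⟩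
      have hnd : rows.Nodup := by
        apply pvNodup_of_len
        simp only [PySem.Set.len] at hnl
        exact_mod_cast hnl
      have hndat : (a :: t).Nodup := (hperm.nodup_iff).mpr hnd
      have hplt : (a :: t).Pairwise (· < ·) :=
        (hpw.and hndat).imp fun h => lt_of_le_of_ne h.1 h.2
      exact (pvChain_last a t hplt).2.mpr (by omega)

-- ===== VERDICT (by name: the statement is the Claim_ definition above) =====
theorem is_vertical_line_py_spec : Claim_equal_is_vertical_line_py := by
  intro positions _
  unfold Spec_is_vertical_line_py is_vertical_line_py is_vertical_line_py_alt
  by_cases hlen : positions.length < 2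
  · simp [hlen]
  · simp only [if_neg hlen]
    by_cases hc : (PySem.Set.ofList (positions.map (·.2))).length = 1
    · have hr : 2 ≤ (positions.map (·.1)).length := by simp; omega
      simpa [PySem.Set.len, hc] using pvMain (positions.map (·.1)) hr
    · simp [PySem.Set.len, hc]
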